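-- pv_equiv track=rewrite | github.com/KiyamovSB/OzonOlympiadProgramming | e.py | del_repeat_alpa_3
-- ===== SOURCE A (Python) =====
-- def del_repeat_alpa_3(good):
--     lastlast = ''
--     last = ''
--     good2 = ''
--     for el in good:
--         if  last == lastlast == el:
--             pass
--         else:
--             good2 += el
--             lastlast = last
--             last = el
--
--     return good2
-- ===== SOURCE B (Python) =====
-- from itertools import groupby
--
-- def del_repeat_alpa_3(good):
--     return ''.join(k * min(2, sum(1 for _ in g)) for k, g in groupby(good))
-- ===== Notes on version B (the rewrite author's own statement) =====
-- stated objective: idiomatic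
-- what changed: Replaces the streaming two-character-memory loop with itertools.groupby: partition the string into maximal runs and emit each run's character capped at two copies.
import Mathlib
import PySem

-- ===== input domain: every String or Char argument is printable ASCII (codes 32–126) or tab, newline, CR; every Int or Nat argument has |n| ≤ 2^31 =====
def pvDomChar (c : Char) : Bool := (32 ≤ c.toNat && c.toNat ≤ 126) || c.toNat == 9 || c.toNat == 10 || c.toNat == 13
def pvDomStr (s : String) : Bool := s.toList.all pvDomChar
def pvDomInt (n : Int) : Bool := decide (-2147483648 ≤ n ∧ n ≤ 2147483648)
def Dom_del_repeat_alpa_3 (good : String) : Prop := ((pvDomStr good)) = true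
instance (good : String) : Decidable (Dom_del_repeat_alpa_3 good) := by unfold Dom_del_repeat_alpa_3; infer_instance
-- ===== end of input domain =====

-- B replaces A's streaming two-character-memory loop with an explicit run-grouping pass
-- (itertools.groupby) emitting each run's character capped at two copies (idiomatic; same cost).

-- ===== PORT A =====
-- state: lastlast/last are ''-initialized one-char strings, modelled as Option Char (none = '')
def delRepAlpa3Loop : List Char → Option Char → Option Char → List Char → List Char
  | [], _, _, good2 => good2
  | el :: rest, lastlast, last, good2 =>
      if last = some el ∧ lastlast = some el then
        delRepAlpa3Loop rest lastlast last good2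
      else
        delRepAlpa3Loop rest last (some el) (good2 ++ [el])

def del_repeat_alpa_3 (good : String) : String :=
  String.mk (delRepAlpa3Loop good.toList none none [])

-- ===== PORT B =====
-- groupby: maximal runs as (key, run length)
def delRepAlpa3Runs : List Char → List (Char × Nat)
  | [] => []
  | c :: rest =>
      (c, 1 + (rest.takeWhile (· = c)).length) :: delRepAlpa3Runs (rest.dropWhile (· = c))
termination_by l => l.length
decreasing_by
  simpa using Nat.lt_succ_of_le (List.length_dropWhile_le (· = c) rest)

def del_repeat_alpa_3_alt (good : String) : String :=
  String.mk ((delRepAlpa3Runs good.toList).flatMap (fun p => List.replicate (min 2 p.2) p.1))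

-- ===== PRECONDITION & SPEC =====
def Spec_del_repeat_alpa_3 (good : String) (out : String) : Prop := out = del_repeat_alpa_3_alt good
instance (good : String) (out : String) : Decidable (Spec_del_repeat_alpa_3 good out) := by unfold Spec_del_repeat_alpa_3; infer_instance

-- ===== CLAIM (what is proved, stated in full; the proofs are below) =====
def Claim_equal_del_repeat_alpa_3 : Prop := ∀ (good : String), Dom_del_repeat_alpa_3 good → Spec_del_repeat_alpa_3 good (del_repeat_alpa_3 good)

-- ===== LEMMAS AND PROOFS =====

-- the head of dropWhile fails the predicate
theorem head?_dropWhile_false {α : Type} (p : α → Bool) :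
    ∀ (l : List α) (c : α), (l.dropWhile p).head? = some c → p c = false := by
  intro l
  induction l with
  | nil => intro c h; simp at h
  | cons a t ih =>
      intro c h
      by_cases hp : p a = true
      · rw [List.dropWhile_cons_of_pos hp] at h; exact ih c h
      · rw [List.dropWhile_cons_of_neg hp] at h
        simp at h
        rw [← h]; exact Bool.eq_false_iff.mpr hp

-- A's loop skips a run of characters equal to its last two emitted characters
theorem delRepAlpa3Loop_skip (c : Char) :
    ∀ (r rest acc : List Char), (∀ x ∈ r, x = c) →
      delRepAlpa3Loop (r ++ rest) (some c) (some c) acc =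
      delRepAlpa3Loop rest (some c) (some c) acc := by
  intro r
  induction r with
  | nil => intro rest acc _; rfl
  | cons d r' ih =>
      intro rest acc hall
      have hd : d = c := hall d (by simp)
      subst hd
      simp only [List.cons_append, delRepAlpa3Loop]
      exact ih rest acc (fun x hx => hall x (by simp [hx]))

-- main invariant: if the current char differs from `last`, A's loop appends the
-- capped runs of the remaining input to the accumulator
theorem delRepAlpa3_key :
    ∀ (n : ℕ) (l : List Char) (lastlast last : Option Char) (acc : List Char),
      l.length ≤ n →
      (∀ c, l.head? = some c → last ≠ some c) →
      delRepAlpa3Loop l lastlast last acc =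
        acc ++ (delRepAlpa3Runs l).flatMap (fun p => List.replicate (min 2 p.2) p.1) := by
  intro n
  induction n with
  | zero =>
      intro l _ _ acc hlen _
      have : l = [] := List.length_eq_zero_iff.mp (Nat.le_zero.mp hlen)
      subst this; simp [delRepAlpa3Loop, delRepAlpa3Runs]
  | succ n ih =>
      intro l lastlast last acc hlen hhead
      match l with
      | [] => simp [delRepAlpa3Loop, delRepAlpa3Runs]
      | c :: rest =>
        have hne : last ≠ some c := hhead c rfl
        have hsplit : rest.takeWhile (· = c) ++ rest.dropWhile (· = c) = rest :=
          List.takeWhile_append_dropWhile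
        have hrestlen : rest.length ≤ n := Nat.lt_succ_iff.mp (Nat.lt_of_lt_of_le (by simp) hlen)
        have hdrophead : ∀ c', (rest.dropWhile (· = c)).head? = some c' →
            (some c : Option Char) ≠ some c' := by
          intro c' h hc
          have := head?_dropWhile_false (· = c) rest c' h
          simp at this
          exact this (by injection hc with h'; exact h'.symm)
        simp only [delRepAlpa3Loop]
        rw [if_neg (fun (h : last = some c ∧ lastlast = some c) => hne h.1)]
        rcases hr : rest.takeWhile (· = c) with _ | ⟨d, r'⟩
        · -- run of length 1
          have hrest : rest.dropWhile (· = c) = rest := by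
            cases rest with
            | nil => rfl
            | cons x t =>
                by_cases hx : x = c
                · rw [List.takeWhile_cons_of_pos (by simp [hx])] at hr; cases hr
                · rw [List.dropWhile_cons_of_neg (by simp [hx])]
          rw [ih rest last (some c) (acc ++ [c]) hrestlen
              (fun c' h => hdrophead c' (by rw [hrest]; exact h))]
          simp [delRepAlpa3Runs, hr, hrest]
        · -- run of length ≥ 2
          have hd : d = c := by
            have hm : d ∈ rest.takeWhile (· = c) := by rw [hr]; simp
            simpa using List.mem_takeWhile_imp hm
          rw [hd] at hr
          have hrest : rest = c :: (r' ++ rest.dropWhile (· = c)) := by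
            conv_lhs => rw [← hsplit, hr]
            simp
          rw [hrest]
          simp only [delRepAlpa3Loop]
          rw [if_neg (fun (h : True ∧ last = some c) => hne h.2)]
          rw [delRepAlpa3Loop_skip c r' (rest.dropWhile (· = c)) (acc ++ [c] ++ [c])
              (fun x hx => by
                have hm : x ∈ rest.takeWhile (· = c) := by rw [hr]; simp [hx]
                simpa using List.mem_takeWhile_imp hm)]
          have hlen' : (rest.dropWhile (· = c)).length ≤ n :=
            le_trans (List.length_dropWhile_le _ _) hrestlen
          rw [ih (rest.dropWhile (· = c)) (some c) (some c) (acc ++ [c] ++ [c]) hlen'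
              (fun c' h => hdrophead c' h)]
          have htk : List.takeWhile (· = c) (r' ++ rest.dropWhile (· = c)) = r' := by
            have h2 := hr
            rw [hrest, List.takeWhile_cons_of_pos (by simp)] at h2
            exact List.cons_injective h2
          have hdw : List.dropWhile (· = c) (r' ++ rest.dropWhile (· = c)) =
              rest.dropWhile (· = c) := by
            conv_rhs => rw [hrest, List.dropWhile_cons_of_pos (by simp)]
          have hmin : min 2 (1 + (r'.length + 1)) = 2 := by omega
          simp [delRepAlpa3Runs, htk, hdw, hmin, List.replicate]

-- ===== VERDICT (by name: the statement is the Claim_ definition above) =====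
theorem del_repeat_alpa_3_spec : Claim_equal_del_repeat_alpa_3 := by
  intro good _
  unfold Spec_del_repeat_alpa_3 del_repeat_alpa_3 del_repeat_alpa_3_alt
  rw [delRepAlpa3_key good.toList.length good.toList none none [] le_rfl
      (by intro c _; simp)]
  simp
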